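-- pv_equiv track=rewrite | github.com/djshuckerow/InterviewPreparation | AlgorithmComplexity/IterativeAnalysis.py | linearithmic
-- ===== SOURCE A (Python) =====
-- def linearithmic(n):
-- 	"O(n*log(n))"
-- 	computations = 0
-- 	for i in range(n):
-- 		j = n
-- 		while j > 0:
-- 			j //= 2
-- 			computations += 1
-- 	return computations
-- ===== SOURCE B (Python) =====
-- def linearithmic(n):
--     "O(n*log(n))"
--     c = 0
--     while 2 ** c <= n:
--         c += 1
--     return c * n
-- ===== Notes on version B (the rewrite author's own statement) =====
-- stated objective: faster
-- what changed: Instead of A's n repetitions of a halving loop, B searches upward for the smallest exponent c whose power of two exceeds n (a doubling search, no halving and no outer loop) and returns c * n.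
import Mathlib
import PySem

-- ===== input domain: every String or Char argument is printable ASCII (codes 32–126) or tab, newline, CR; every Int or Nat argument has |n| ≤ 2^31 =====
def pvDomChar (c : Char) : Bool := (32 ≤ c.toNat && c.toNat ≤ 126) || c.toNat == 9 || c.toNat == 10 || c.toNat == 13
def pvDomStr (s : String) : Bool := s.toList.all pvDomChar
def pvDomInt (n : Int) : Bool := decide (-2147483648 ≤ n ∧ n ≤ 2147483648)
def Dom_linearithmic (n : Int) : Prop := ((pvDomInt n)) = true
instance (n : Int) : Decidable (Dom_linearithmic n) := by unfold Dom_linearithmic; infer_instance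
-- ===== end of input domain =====

-- B replaces A's n repetitions of a halving loop by a single upward search for the smallest c with 2^c > n, returning c * n: asymptotically faster.

-- ===== PORT A =====
-- inner 'while j > 0: j //= 2; computations += 1' loop of A
def linearithmicInner (j comp : Int) : Int :=
  if j > 0 then linearithmicInner (PySem.Int.floordiv j 2) (comp + 1) else comp
termination_by j.toNat
decreasing_by
  have hf : PySem.Int.floordiv j 2 = j / 2 := PySem.Int.floordiv_eq_ediv_of_pos (by norm_num)
  have h2 : j / 2 < j := by omega
  have h3 : 0 ≤ j / 2 := by omega
  simp only [hf]; omega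

def linearithmic (n : Int) : Int :=
  (PySem.List.pyRange 0 n 1).foldl (fun comp _ => linearithmicInner n comp) 0

-- ===== PORT B =====
-- B's 'c = 0; while 2 ** c <= n: c += 1' loop; the counter c is a Nat since it
-- starts at 0 and only increments (2**c with c ≥ 0 matches Python exactly).
def linearithmicSearch (n : Int) (c : Nat) : Nat :=
  if (2 : Int) ^ c ≤ n then linearithmicSearch n (c + 1) else c
termination_by (n - c).toNat
decreasing_by
  have hc : (c : Int) < 2 ^ c := by exact_mod_cast Nat.lt_two_pow_self
  omega

def linearithmic_alt (n : Int) : Int :=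
  ((linearithmicSearch n 0 : Nat) : Int) * n

-- ===== PRECONDITION & SPEC =====
def Spec_linearithmic (n : Int) (out : Int) : Prop := out = linearithmic_alt n
instance (n : Int) (out : Int) : Decidable (Spec_linearithmic n out) := by unfold Spec_linearithmic; infer_instance

-- ===== CLAIM (what is proved, stated in full; the proofs are below) =====
def Claim_equal_linearithmic : Prop := ∀ (n : Int), Dom_linearithmic n → Spec_linearithmic n (linearithmic n)

-- ===== LEMMAS AND PROOFS =====
lemma loop_shift : ∀ (k : Nat) (j c : Int), j.toNat = k →
    linearithmicInner j c = c + linearithmicInner j 0 := by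
  intro k
  induction k using Nat.strong_induction_on with
  | _ k ih =>
    intro j c hk
    conv_lhs => rw [linearithmicInner]
    conv_rhs => rw [linearithmicInner]
    split_ifs with h
    · have hf : PySem.Int.floordiv j 2 = j / 2 := PySem.Int.floordiv_eq_ediv_of_pos (by norm_num)
      have h2 : j / 2 < j := by omega
      have h3 : 0 ≤ j / 2 := by omega
      have hlt : (PySem.Int.floordiv j 2).toNat < k := by omega
      rw [ih _ hlt _ (c + 1) rfl, ih _ hlt _ (0 + 1) rfl]
      ring
    · ring

-- characterisation of A's inner loop: its count h satisfies j < 2^h and (if j > 0) 2^(h-1) ≤ j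
lemma inner_pow : ∀ (k : Nat) (j : Int), j.toNat = k → 0 ≤ j →
    0 ≤ linearithmicInner j 0 ∧
    j < 2 ^ (linearithmicInner j 0).toNat ∧
    (0 < j → 1 ≤ linearithmicInner j 0 ∧ 2 ^ ((linearithmicInner j 0).toNat - 1) ≤ j) := by
  intro k
  induction k using Nat.strong_induction_on with
  | _ k ih =>
    intro j hk hj
    by_cases h : j > 0
    · have hf : PySem.Int.floordiv j 2 = j / 2 := PySem.Int.floordiv_eq_ediv_of_pos (by norm_num)
      have h2 : j / 2 < j := by omega
      have h3 : 0 ≤ j / 2 := by omega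
      obtain ⟨ih0, ih1, ih2⟩ := ih (j / 2).toNat (by omega) (j / 2) rfl h3
      have hstep : linearithmicInner j 0 = 1 + linearithmicInner (j / 2) 0 := by
        conv_lhs => rw [linearithmicInner]
        rw [if_pos h, hf, loop_shift (j / 2).toNat _ _ rfl]
        ring
      set h' := linearithmicInner (j / 2) 0 with hh'
      have htn : (1 + h').toNat = h'.toNat + 1 := by omega
      refine ⟨by omega, ?_, ?_⟩
      · rw [hstep, htn, pow_succ]
        omega
      · intro _
        refine ⟨by omega, ?_⟩
        rw [hstep, htn]
        simp only [Nat.add_sub_cancel]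
        by_cases hj2 : 0 < j / 2
        · obtain ⟨hge1, hlow⟩ := ih2 hj2
          have : (2 : Int) ^ h'.toNat = 2 ^ (h'.toNat - 1) * 2 := by
            rw [← pow_succ]
            congr 1
            omega
          rw [this]
          omega
        · have hj1 : j = 1 := by omega
          have : h' = 0 := by
            rw [hh', hj1]
            norm_num
            rw [linearithmicInner]
            norm_num
          rw [this]
          simp
          omega
    · refine ⟨?_, ?_, by omega⟩ <;> rw [linearithmicInner, if_neg h] <;> simp <;> omega

-- characterisation of B's search: it returns the first k ≥ c with 2^k > n
lemma search_char : ∀ (d c k : Nat) (n : Int), k = c + d → n < (2 : Int) ^ k →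
    (∀ i, c ≤ i → i < k → (2 : Int) ^ i ≤ n) → linearithmicSearch n c = k := by
  intro d
  induction d with
  | zero =>
    intro c k n hk hub _
    have hck : k = c := by omega
    subst hck
    rw [linearithmicSearch, if_neg (by omega)]
  | succ d ih =>
    intro c k n hk hub hlo
    rw [linearithmicSearch, if_pos (hlo c le_rfl (by omega))]
    exact ih (c + 1) k n (by omega) hub (fun i h1 h2 => hlo i (by omega) h2)

lemma foldl_inner (n : Int) (L : List Int) (s : Int) :
    L.foldl (fun comp _ => linearithmicInner n comp) s
      = s + (L.length : Int) * linearithmicInner n 0 := by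
  induction L generalizing s with
  | nil => simp
  | cons x xs ih =>
    simp only [List.foldl_cons, List.length_cons, ih]
    rw [loop_shift n.toNat n s rfl]
    push_cast
    ring

-- ===== VERDICT (by name: the statement is the Claim_ definition above) =====
theorem linearithmic_spec : Claim_equal_linearithmic := by
  intro n _
  unfold Spec_linearithmic linearithmic linearithmic_alt
  by_cases h : n ≤ 0
  · rw [PySem.List.pyRange_one_eq_nil (by omega)]
    have : linearithmicSearch n 0 = 0 := by
      rw [linearithmicSearch, if_neg (by norm_num; omega)]
    simp [this]
  · push_neg at h
    obtain ⟨h0, hub, hlow⟩ := inner_pow n.toNat n rfl (by omega)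
    obtain ⟨hge1, hlo⟩ := hlow h
    set k := (linearithmicInner n 0).toNat with hkdef
    have hsearch : linearithmicSearch n 0 = k := by
      refine search_char k 0 k n (by omega) hub ?_
      intro i _ hik
      calc (2 : Int) ^ i ≤ 2 ^ (k - 1) := by
            apply pow_le_pow_right₀ (by norm_num)
            omega
        _ ≤ n := hlo
    rw [foldl_inner, PySem.List.length_pyRange_one, hsearch]
    have hcast : (((n - 0).toNat : Nat) : Int) = n := by omega
    have hkc : ((k : Nat) : Int) = linearithmicInner n 0 := by omega
    rw [hcast, hkc]
    ring
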